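-- pv_equiv track=rewrite | github.com/MohamedMostafa100/Leetcode-Solutions | 2075-decode-the-slanted-ciphertext/2075-decode-the-slanted-ciphertext.py | decodeCiphertext
-- ===== SOURCE A (Python) =====
-- def decodeCiphertext(encodedText: str, rows: int) -> str:
--     res = ""
--     cols = len(encodedText) // rows
--     if cols == 0:
--         return ""
--     textMat = [list(encodedText[i * cols : i * cols + cols]) for i in range(rows)]
--     for idx in range(cols):
--         i = 0
--         j = idx
--         while i < rows and j < cols:
--             res += textMat[i][j]
--             i += 1
--             j += 1
--     return res.rstrip()
-- ===== SOURCE B (Python) =====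
-- def decodeCiphertext(encodedText: str, rows: int) -> str:
--     cols = len(encodedText) // rows
--     if cols <= 0:
--         return ""
--     buckets = [[] for _ in range(cols)]
--     for k in range(rows * cols):
--         i, j = divmod(k, cols)
--         if j >= i:
--             buckets[j - i].append(encodedText[k])
--     return "".join("".join(b) for b in buckets).rstrip()
-- ===== Notes on version B (the rewrite author's own statement) =====
-- stated objective: alternative
-- what changed: B replaces A's matrix build plus nested per-diagonal walk with repeated string concatenation by a single linear pass over the flat string that groups each character into a per-diagonal bucket keyed by j-i (divmod of the flat index), joined once at the end.
import Mathlib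
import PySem

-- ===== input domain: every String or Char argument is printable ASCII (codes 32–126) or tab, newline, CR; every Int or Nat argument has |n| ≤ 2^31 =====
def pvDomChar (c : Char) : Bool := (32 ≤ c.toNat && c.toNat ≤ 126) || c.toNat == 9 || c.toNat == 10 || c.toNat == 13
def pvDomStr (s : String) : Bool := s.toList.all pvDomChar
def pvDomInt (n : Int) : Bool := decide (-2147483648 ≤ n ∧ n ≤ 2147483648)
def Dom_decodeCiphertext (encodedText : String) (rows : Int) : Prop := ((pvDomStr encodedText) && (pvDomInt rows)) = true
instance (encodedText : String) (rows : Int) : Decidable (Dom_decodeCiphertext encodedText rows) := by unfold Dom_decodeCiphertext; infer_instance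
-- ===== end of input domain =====

-- B replaces A's matrix build and nested diagonal walk by a single linear pass over the flat
-- string grouping characters into per-diagonal buckets (objective: alternative).


-- ===== PORT A =====
-- A's `while i < rows and j < cols` loop; the Nat argument is fuel (≥ remaining iterations,
-- a pure totality guard: the loop itself exits via its own condition). textMat[i][j] is always in range when read.
def pvAWhile (textMat : List (List Char)) (rows cols : Int) : Nat → Int → Int → List Char → List Char
  | 0, _, _, res => res
  | n + 1, i, j, res =>
    if i < rows ∧ j < cols then
      pvAWhile textMat rows cols n (i + 1) (j + 1)
        (res ++ [PySem.List.pyGetD (PySem.List.pyGetD textMat i []) j ' '])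
    else res

def decodeCiphertext (encodedText : String) (rows : Int) : String :=
  let text := encodedText.toList
  let cols := PySem.Int.floordiv (text.length : Int) rows
  if cols = 0 then "" else
  let textMat := (PySem.List.pyRange 0 rows 1).map
      (fun i => PySem.List.slice text (some (i * cols)) (some (i * cols + cols)))
  let res := (PySem.List.pyRange 0 cols 1).foldl
      (fun res idx => pvAWhile textMat rows cols rows.toNat 0 idx res) []
  String.ofList (PySem.Chars.rstrip res)

-- ===== PORT B =====
-- B: one pass over range(rows*cols); divmod the flat index, drop below-diagonal cells,
-- append each kept character to the bucket of its diagonal j-i; join buckets, rstrip.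
-- buckets[j-i] is always in range when touched, so pyGetD/pySetD with defaults are exact.
def pvBStep (text : List Char) (cols : Int) (bs : List (List Char)) (k : Int) : List (List Char) :=
  let i := PySem.Int.floordiv k cols
  let j := PySem.Int.mod k cols
  if i ≤ j then
    PySem.List.pySetD bs (j - i) (PySem.List.pyGetD bs (j - i) [] ++ [PySem.List.pyGetD text k ' '])
  else bs

def decodeCiphertext_alt (encodedText : String) (rows : Int) : String :=
  let text := encodedText.toList
  let cols := PySem.Int.floordiv (text.length : Int) rows
  if cols ≤ 0 then "" else
  let buckets := (PySem.List.pyRange 0 (rows * cols) 1).foldl (pvBStep text cols)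
      ((PySem.List.pyRange 0 cols 1).map (fun _ => ([] : List Char)))
  String.ofList (PySem.Chars.rstrip buckets.flatten)

-- ===== PRECONDITION & SPEC =====
-- Pre_ excludes rows = 0, on which Python A raises ZeroDivisionError.
def Pre_decodeCiphertext (encodedText : String) (rows : Int) : Prop := rows ≠ 0
instance (encodedText : String) (rows : Int) : Decidable (Pre_decodeCiphertext encodedText rows) := by
  unfold Pre_decodeCiphertext; infer_instance

def pvWitness_decodeCiphertext : String × Int := ("coding", 2)

def Spec_decodeCiphertext (encodedText : String) (rows : Int) (out : String) : Prop := out = decodeCiphertext_alt encodedText rows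
instance (encodedText : String) (rows : Int) (out : String) : Decidable (Spec_decodeCiphertext encodedText rows out) := by unfold Spec_decodeCiphertext; infer_instance

-- ===== CLAIM (what is proved, stated in full; the proofs are below) =====
def Claim_equal_decodeCiphertext : Prop := ∀ (encodedText : String) (rows : Int), Dom_decodeCiphertext encodedText rows → Pre_decodeCiphertext encodedText rows → Spec_decodeCiphertext encodedText rows (decodeCiphertext encodedText rows)

-- ===== LEMMAS AND PROOFS =====

-- canonical value: the diagonal starting at column d, read off the flat string with stride cols+1
def pvDiag (text : List Char) (rows cols d : Int) : List Char :=
  (PySem.List.pyRange 0 (min rows (cols - d)) 1).map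
    (fun i => PySem.List.pyGetD text (d + i * (cols + 1)) ' ')

-- the character A reads from the matrix is the flat-string character at j + i*cols
theorem pv_char_eq (text : List Char) (rows cols i j : Int)
    (hrc : rows * cols ≤ (text.length : Int))
    (hi : 0 ≤ i) (hj : 0 ≤ j) (hir : i < rows) (hjc : j < cols) :
    PySem.List.pyGetD (PySem.List.pyGetD
        ((PySem.List.pyRange 0 rows 1).map
          (fun k => PySem.List.slice text (some (k * cols)) (some (k * cols + cols)))) i []) j ' '
      = PySem.List.pyGetD text (j + i * cols) ' ' := by
  have hc : 0 < cols := lt_of_le_of_lt hj hjc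
  rw [PySem.List.pyGetD_map_pyRange_of_nonneg _ rows i [] hi hir]
  have ha : 0 ≤ i * cols := mul_nonneg hi (le_of_lt hc)
  have hub : i * cols + cols ≤ rows * cols := by nlinarith
  rw [PySem.List.slice_toNat text ha (by omega)]
  have hlen : ((text.drop (i * cols).toNat).take ((i * cols + cols).toNat - (i * cols).toNat)).length
      = cols.toNat := by
    simp [List.length_take, List.length_drop]
    omega
  rw [PySem.List.pyGetD_eq_getElem _ ' ' hj (by rw [hlen]; omega)]
  rw [PySem.List.pyGetD_eq_getElem text ' ' (by omega) (by omega)]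
  rw [List.getElem_take, List.getElem_drop]
  congr 1
  omega

-- A's diagonal walk from (i, idx+i) produces the tail of pvDiag
theorem pvAWhile_spec (text : List Char) (rows cols idx : Int)
    (hrc : rows * cols ≤ (text.length : Int)) (hidx : 0 ≤ idx) :
    ∀ (n : Nat) (i : Int) (res : List Char), 0 ≤ i →
      (min rows (cols - idx) - i).toNat ≤ n →
      pvAWhile ((PySem.List.pyRange 0 rows 1).map
          (fun k => PySem.List.slice text (some (k * cols)) (some (k * cols + cols))))
          rows cols n i (idx + i) res
        = res ++ (PySem.List.pyRange i (min rows (cols - idx)) 1).map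
            (fun t => PySem.List.pyGetD text (idx + t * (cols + 1)) ' ') := by
  intro n
  induction n with
  | zero =>
    intro i res hi hfuel
    rw [pvAWhile, PySem.List.pyRange_one_eq_nil (by omega)]
    simp
  | succ n ih =>
    intro i res hi hfuel
    rw [pvAWhile]
    by_cases h : i < rows ∧ idx + i < cols
    · rw [if_pos h]
      have hchar := pv_char_eq text rows cols i (idx + i) hrc hi (by omega) h.1 h.2
      have hrec := ih (i + 1)
          (res ++ [PySem.List.pyGetD (PySem.List.pyGetD
            ((PySem.List.pyRange 0 rows 1).map
              (fun k => PySem.List.slice text (some (k * cols)) (some (k * cols + cols)))) i []) (idx + i) ' '])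
          (by omega) (by omega)
      rw [show idx + i + 1 = idx + (i + 1) by ring, hrec,
        PySem.List.pyRange_one_cons (by omega : i < min rows (cols - idx))]
      rw [List.map_cons, hchar]
      simp only [List.append_assoc, List.singleton_append]
      congr 2
      ring
    · rw [if_neg h, PySem.List.pyRange_one_eq_nil (by omega)]
      simp

-- divmod is determined: a cell on diagonal d at step i has flat index with quotient i, remainder i+d
theorem pv_divmod_unique (cols i d K : Int) (hc : 0 < cols) (hi : 0 ≤ i) (hd : 0 ≤ d)
    (hdc : i + d < cols) (hK : d + i * (cols + 1) = K) :
    PySem.Int.floordiv K cols = i ∧ PySem.Int.mod K cols = i + d := by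
  have hK' : K = i * cols + (i + d) := by linarith [hK, mul_comm i (cols + 1)]
  have h1 : PySem.Int.floordiv K cols = i := by
    rw [PySem.Int.floordiv_eq_iff_of_pos hc]
    constructor <;> nlinarith
  refine ⟨h1, ?_⟩
  have := PySem.Int.floordiv_mul_add_mod K cols
  rw [h1] at this
  linarith

-- B's single pass, truncated after the first K flat indices: bucket d holds the prefix of
-- diagonal d whose flat indices are < K
theorem pvBuckets_inv (text : List Char) (rows cols : Int) (hc : 0 < cols) :
    ∀ (K : Nat), (K : Int) ≤ rows * cols →
      (PySem.List.pyRange 0 (K : Int) 1).foldl (pvBStep text cols)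
          ((PySem.List.pyRange 0 cols 1).map (fun _ => ([] : List Char)))
        = (PySem.List.pyRange 0 cols 1).map
            (fun d => ((PySem.List.pyRange 0 (min rows (cols - d)) 1).filter
                (fun i => decide (d + i * (cols + 1) < (K : Int)))).map
              (fun i => PySem.List.pyGetD text (d + i * (cols + 1)) ' ')) := by
  intro K
  induction K with
  | zero =>
    intro _
    rw [show PySem.List.pyRange 0 (((0:Nat)):Int) 1 = [] from
          PySem.List.pyRange_one_eq_nil (by norm_num)]
    simp only [List.foldl_nil]
    apply List.map_congr_left
    intro d hd
    have hd0 := (PySem.List.mem_pyRange_one.1 hd).1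
    rw [List.filter_eq_nil_iff.2, List.map_nil]
    intro i hi
    have hi0 := (PySem.List.mem_pyRange_one.1 hi).1
    simp only [decide_eq_true_eq, not_lt]
    push_cast
    nlinarith
  | succ K ih =>
    intro hK
    have hK' : (K : Int) ≤ rows * cols := by push_cast at hK ⊢; omega
    have hsplit : PySem.List.pyRange 0 ((K : Nat) + 1 : Int) 1
        = PySem.List.pyRange 0 (K : Int) 1 ++ [(K : Int)] :=
      PySem.List.pyRange_one_succ_right (Int.natCast_nonneg K)
    rw [show (((K + 1 : Nat)) : Int) = ((K : Nat) : Int) + 1 by push_cast; ring, hsplit,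
      List.foldl_append, ih hK']
    simp only [List.foldl_cons, List.foldl_nil]
    set i0 := PySem.Int.floordiv (K : Int) cols with hi0def
    set j0 := PySem.Int.mod (K : Int) cols with hj0def
    have hi0nn : 0 ≤ i0 := by
      rw [hi0def, PySem.Int.floordiv_eq_ediv_of_pos hc]
      exact Int.ediv_nonneg (by positivity) (le_of_lt hc)
    have hj0nn : 0 ≤ j0 := PySem.Int.mod_nonneg _ hc
    have hj0lt : j0 < cols := PySem.Int.mod_lt _ hc
    have hKeq : i0 * cols + j0 = (K : Int) := PySem.Int.floordiv_mul_add_mod _ _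
    -- no valid cell other than (i0, j0 - i0) has flat index K
    have hnohit : ∀ d i : Int, 0 ≤ d → 0 ≤ i → i + d < cols → d + i * (cols + 1) = (K : Int) →
        i = i0 ∧ i + d = j0 := by
      intro d i hd hi hidc heq
      obtain ⟨h1, h2⟩ := pv_divmod_unique cols i d (K : Int) hc hi hd hidc heq
      exact ⟨by rw [hi0def, h1], by rw [hj0def, h2]⟩
    rw [pvBStep]
    by_cases hij : i0 ≤ j0
    · rw [if_pos hij]
      set d0 := j0 - i0 with hd0def
      have hd0nn : 0 ≤ d0 := by omega
      have hd0lt : d0 < cols := by omega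
      have hidx0 : d0 + i0 * (cols + 1) = (K : Int) := by
        rw [hd0def]; linarith [hKeq, mul_comm i0 (cols + 1)]
      have hi0rows : i0 < rows := by
        by_contra hcon
        rw [not_lt] at hcon
        have : rows * cols ≤ i0 * cols := mul_le_mul_of_nonneg_right hcon (le_of_lt hc)
        omega
      have hi0M : i0 < min rows (cols - d0) := by omega
      rw [PySem.List.pyGetD_map_pyRange_of_nonneg _ cols d0 [] hd0nn hd0lt]
      rw [PySem.List.pySetD_of_nonneg _ _ hd0nn]
      apply List.ext_getElem
      · simp [PySem.List.length_pyRange_one]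
      · intro n h1 h2
        have hcolslen : ((PySem.List.pyRange 0 cols 1).map (fun d =>
            ((PySem.List.pyRange 0 (min rows (cols - d)) 1).filter
                (fun i => decide (d + i * (cols + 1) < (K : Int)))).map
              (fun i => PySem.List.pyGetD text (d + i * (cols + 1)) ' '))).length = cols.toNat := by
          simp [PySem.List.length_pyRange_one]
        have hn : n < cols.toNat := by
          rw [List.length_set, hcolslen] at h1; exact h1
        rw [List.getElem_set, List.getElem_map, List.getElem_map,
          PySem.List.getElem_pyRange_one]
        simp only [zero_add]
        by_cases hnd : d0.toNat = n
        · rw [if_pos hnd]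
          have hdval : ((n : Int)) = d0 := by omega
          rw [hdval]
          -- split the diagonal range at i0
          have hM : i0 ≤ min rows (cols - d0) := le_of_lt hi0M
          rw [PySem.List.pyRange_one_append 0 i0 (min rows (cols - d0)) hi0nn hM,
            PySem.List.pyRange_one_cons hi0M]
          rw [List.filter_append, List.filter_append, List.filter_cons, List.filter_cons]
          have hpre : ∀ (P : Int → Bool), (∀ i, 0 ≤ i → i < i0 → P i = true) →
              (PySem.List.pyRange 0 i0 1).filter P = PySem.List.pyRange 0 i0 1 := by
            intro P hP
            apply List.filter_eq_self.2
            intro i hi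
            have := PySem.List.mem_pyRange_one.1 hi
            exact hP i this.1 this.2
          have htail : ∀ (P : Int → Bool), (∀ i, i0 < i → P i = false) →
              (PySem.List.pyRange (i0 + 1) (min rows (cols - d0)) 1).filter P = [] := by
            intro P hP
            apply List.filter_eq_nil_iff.2
            intro i hi
            have := PySem.List.mem_pyRange_one.1 hi
            simp [hP i (by omega)]
          rw [hpre _ (fun i hi hii0 => by
                simp only [decide_eq_true_eq]
                nlinarith),
              hpre _ (fun i hi hii0 => by
                simp only [decide_eq_true_eq]
                nlinarith),
              htail _ (fun i hii0 => by
                simp only [decide_eq_false_iff_not, not_lt]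
                nlinarith),
              htail _ (fun i hii0 => by
                simp only [decide_eq_false_iff_not, not_lt]
                nlinarith)]
          simp only [hidx0, decide_eq_true_eq]
          rw [if_pos (by omega : ((K : Int) < (K : Int) + 1)), if_neg (by omega : ¬ ((K : Int) < (K : Int)))]
          simp [hidx0]
        · rw [if_neg hnd]
          congr 1
          apply List.filter_congr
          intro i hi
          obtain ⟨hi1, hi2⟩ := PySem.List.mem_pyRange_one.1 hi
          have hne : (n : Int) + i * (cols + 1) ≠ (K : Int) := by
            intro heq
            obtain ⟨he1, he2⟩ := hnohit (n : Int) i (by positivity) hi1 (by omega) heq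
            omega
          simp only [decide_eq_decide]
          omega
    · rw [if_neg hij]
      apply List.map_congr_left
      intro d hd
      obtain ⟨hd1, hd2⟩ := PySem.List.mem_pyRange_one.1 hd
      congr 1
      apply List.filter_congr
      intro i hi
      obtain ⟨hi1, hi2⟩ := PySem.List.mem_pyRange_one.1 hi
      have hne : d + i * (cols + 1) ≠ (K : Int) := by
        intro heq
        obtain ⟨he1, he2⟩ := hnohit d i hd1 hi1 (by omega) heq
        omega
      simp only [decide_eq_decide]
      omega

-- ===== VERDICT (by name: the statement is the Claim_ definition above) =====
theorem decodeCiphertext_spec : Claim_equal_decodeCiphertext := by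
  intro s rows _ hpre
  unfold Pre_decodeCiphertext at hpre
  unfold Spec_decodeCiphertext decodeCiphertext decodeCiphertext_alt
  simp only []
  set text := s.toList with htext
  set cols := PySem.Int.floordiv (text.length : Int) rows with hcolsdef
  by_cases hc : 0 < cols
  · -- main case: rows > 0 and both programs build the diagonals
    have hrpos : 0 < rows := by
      rcases lt_trichotomy rows 0 with hlt | h0 | hgt
      · have := PySem.Int.floordiv_mul_add_mod (text.length : Int) rows
        have hb := PySem.Int.mod_neg_bounds (text.length : Int) hlt
        have hL : 0 ≤ (text.length : Int) := by positivity
        nlinarith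
      · exact absurd h0 hpre
      · exact hgt
    have hrc : rows * cols ≤ (text.length : Int) := by
      have h1 := PySem.Int.floordiv_mul_add_mod (text.length : Int) rows
      have h2 := PySem.Int.mod_nonneg (text.length : Int) hrpos
      nlinarith
    rw [if_neg (by omega : ¬ cols = 0), if_neg (by omega : ¬ cols ≤ 0)]
    congr 1
    apply congrArg
    -- A's side: the nested walk is the concatenation of the diagonals
    have hA : (PySem.List.pyRange 0 cols 1).foldl
        (fun res idx => pvAWhile ((PySem.List.pyRange 0 rows 1).map
            (fun i => PySem.List.slice text (some (i * cols)) (some (i * cols + cols))))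
          rows cols rows.toNat 0 idx res) []
        = (PySem.List.pyRange 0 cols 1).flatMap (pvDiag text rows cols) := by
      have hstep : (PySem.List.pyRange 0 cols 1).foldl
          (fun res idx => pvAWhile ((PySem.List.pyRange 0 rows 1).map
              (fun i => PySem.List.slice text (some (i * cols)) (some (i * cols + cols))))
            rows cols rows.toNat 0 idx res) []
          = (PySem.List.pyRange 0 cols 1).foldl
              (fun res idx => res ++ pvDiag text rows cols idx) [] := by
        apply PySem.List.foldl_congr_mem
        intro acc idx hmem
        obtain ⟨hidx1, _⟩ := PySem.List.mem_pyRange_one.1 hmem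
        have := pvAWhile_spec text rows cols idx hrc hidx1 rows.toNat 0 acc le_rfl (by omega)
        rw [show idx + 0 = idx by ring] at this
        rw [this, pvDiag]
      rw [hstep, PySem.List.foldl_append_eq_flatMap, List.nil_append]
    rw [hA]
    -- B's side: the bucket pass produces exactly the diagonals
    have hposrc : 0 < rows * cols := mul_pos hrpos hc
    have hB := pvBuckets_inv text rows cols hc (rows * cols).toNat
        (by omega)
    rw [show (((rows * cols).toNat : Nat) : Int) = rows * cols by
          omega] at hB
    rw [hB]
    rw [List.flatMap_def]
    congr 1
    apply List.map_congr_left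
    intro d hd
    obtain ⟨hd1, hd2⟩ := PySem.List.mem_pyRange_one.1 hd
    rw [pvDiag]
    congr 1
    symm
    apply List.filter_eq_self.2
    intro i hi
    obtain ⟨hi1, hi2⟩ := PySem.List.mem_pyRange_one.1 hi
    simp only [decide_eq_true_eq]
    have h1 : i + d < cols := by omega
    have h2 : i + 1 ≤ rows := by omega
    nlinarith [mul_le_mul_of_nonneg_right h2 (le_of_lt hc)]
  · -- cols ≤ 0: both sides are the empty string
    rw [if_pos (by omega : cols ≤ 0)]
    by_cases h0 : cols = 0
    · rw [if_pos h0]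
    · rw [if_neg h0]
      rw [PySem.List.pyRange_one_eq_nil (by omega : cols ≤ 0)]
      simp [PySem.Chars.rstrip]
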